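-- pv_equiv track=rewrite | github.com/youtao1999/tfim_quantum_spin_analysis | tfim_EE.py | horizontal_bipartition
-- ===== SOURCE A (Python) =====
-- def Diff(li1, li2):
--     li_dif = [i for i in li1 + li2 if i not in li1 or i not in li2]
--     return li_dif
--
-- def horizontal_bipartition(L):
--     # L[0] is the number of rows, L[1] the number of columns
--     N = L[0] * L[1]
--     A = []
--     mid_line = L[0] // 2
--     A_init_lines = [i * L[1] for i in range(mid_line)]
--     #     A = [(mid_line + L[1] * i) for i in range(L[0])]
--     for init in A_init_lines:
--         A.append([(init + i) for i in range(L[1])])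
--     A = [x for sublist in A for x in sublist]
--
--     complete = [i for i in range(N)]
--     B = Diff(complete, A)
--     return A, B
-- ===== SOURCE B (Python) =====
-- def horizontal_bipartition(L):
--     rows, cols = L[0], L[1]
--     split = (rows // 2) * cols
--     return list(range(split)), list(range(split, rows * cols))
-- ===== Notes on version B (the rewrite author's own statement) =====
-- stated objective: simpler
-- what changed: Replaces the nested row/column loops plus the quadratic complement scan (Diff over range(N)) with closed-form index arithmetic: the boundary index split = (L[0]//2)*L[1] yields both halves as two contiguous ranges.
-- outside the precondition, e.g. on horizontal_bipartition([-1, -1]): A returns ([], [0]), B returns ([0], []); on horizontal_bipartition([5]): A raises IndexError, B raises IndexError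
import Mathlib
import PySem

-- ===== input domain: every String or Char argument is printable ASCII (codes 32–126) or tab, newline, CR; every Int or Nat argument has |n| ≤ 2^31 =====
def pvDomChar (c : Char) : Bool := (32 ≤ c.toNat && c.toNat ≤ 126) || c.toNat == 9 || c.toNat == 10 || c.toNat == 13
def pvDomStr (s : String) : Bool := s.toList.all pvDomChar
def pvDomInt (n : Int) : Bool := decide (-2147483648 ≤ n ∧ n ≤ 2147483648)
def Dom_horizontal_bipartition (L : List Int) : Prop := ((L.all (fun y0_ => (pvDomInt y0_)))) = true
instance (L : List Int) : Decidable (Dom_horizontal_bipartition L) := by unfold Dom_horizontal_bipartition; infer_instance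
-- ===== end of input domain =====

-- B replaces A's nested row loops and quadratic complement scan with closed-form
-- index arithmetic: both halves are contiguous ranges split at (L[0]//2)*L[1].


-- ===== PORT A =====
def Diff (li1 li2 : List Int) : List Int :=
  (li1 ++ li2).filter (fun i => !(li1.contains i) || !(li2.contains i))

def horizontal_bipartition (L : List Int) : List Int × List Int :=
  (((PySem.List.pyGet? L 0).bind fun l0 =>
    (PySem.List.pyGet? L 1).map fun l1 =>
      let N := l0 * l1
      let mid_line := PySem.Int.floordiv l0 2
      let A_init_lines := (PySem.List.pyRange 0 mid_line 1).map (fun i => i * l1)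
      let A2 := A_init_lines.map (fun init => (PySem.List.pyRange 0 l1 1).map (fun i => init + i))
      let A := A2.flatten
      let complete := PySem.List.pyRange 0 N 1
      let B := Diff complete A
      (A, B)) : Option (List Int × List Int)).getD ([], [])
      -- none (= IndexError on L[0]/L[1]) is excluded by Pre_; .getD only totalises

-- ===== PORT B =====
def horizontal_bipartition_alt (L : List Int) : List Int × List Int :=
  (((PySem.List.pyGet? L 0).bind fun rows =>
    (PySem.List.pyGet? L 1).map fun cols =>
      let split := (PySem.Int.floordiv rows 2) * cols
      (PySem.List.pyRange 0 split 1, PySem.List.pyRange split (rows * cols) 1)) :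
    Option (List Int × List Int)).getD ([], [])
      -- none (= IndexError on L[0]/L[1]) is excluded by Pre_; .getD only totalises

-- ===== PRECONDITION & SPEC =====
-- Pre_ excludes lists shorter than 2 (A raises IndexError on L[0]/L[1]) and lattices with
-- BOTH dimensions negative — outside the task's natural domain of row/column counts, where
-- A's empty-A/full-B value is an artefact of its empty range loops.
def Pre_horizontal_bipartition (L : List Int) : Prop :=
  2 ≤ L.length ∧ (0 ≤ L.getD 0 0 ∨ 0 ≤ L.getD 1 0)
instance (L : List Int) : Decidable (Pre_horizontal_bipartition L) := by
  unfold Pre_horizontal_bipartition; infer_instance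

def pvWitness_horizontal_bipartition : List Int := [4, 3]

def Spec_horizontal_bipartition (L : List Int) (out : List Int × List Int) : Prop :=
  out = horizontal_bipartition_alt L
instance (L : List Int) (out : List Int × List Int) : Decidable (Spec_horizontal_bipartition L out) := by
  unfold Spec_horizontal_bipartition; infer_instance

-- ===== CLAIM (what is proved, stated in full; the proofs are below) =====
def Claim_equal_horizontal_bipartition : Prop :=
  ∀ (L : List Int), Dom_horizontal_bipartition L → Pre_horizontal_bipartition L →
    Spec_horizontal_bipartition L (horizontal_bipartition L)

-- ===== LEMMAS AND PROOFS =====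

-- shifting a 0-based range: [c + i for i in range(b)] = range(c, c+b)
lemma pyRange_shift (c b : Int) :
    (PySem.List.pyRange 0 b 1).map (fun i => c + i) = PySem.List.pyRange c (c + b) 1 := by
  simp [PySem.List.pyRange_one, List.map_map, Function.comp]

-- flattening A's row lists gives one contiguous range, for a Nat row count
lemma flat_rows (n : Nat) (l1 : Int) (h1 : 0 ≤ l1) :
    (((PySem.List.pyRange 0 (n : Int) 1).map (fun i => i * l1)).map
      (fun init => (PySem.List.pyRange 0 l1 1).map (fun i => init + i))).flatten
      = PySem.List.pyRange 0 ((n : Int) * l1) 1 := by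
  induction n with
  | zero => simp [PySem.List.pyRange_one_eq_nil]
  | succ m ih =>
      have hsplit : PySem.List.pyRange 0 ((m : Int) + 1) 1
          = PySem.List.pyRange 0 (m : Int) 1 ++ [(m : Int)] :=
        PySem.List.pyRange_one_succ_right (by positivity)
      push_cast
      rw [hsplit]
      simp only [List.map_append, List.map_cons, List.map_nil, List.flatten_append,
        List.flatten_cons, List.flatten_nil, List.append_nil]
      rw [ih, pyRange_shift ((m : Int) * l1) l1,
        ← PySem.List.pyRange_one_append 0 ((m : Int) * l1) ((m : Int) * l1 + l1)
          (by positivity) (by omega)]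
      ring_nf

-- filtering out the first s elements of range(N)
lemma filter_ge (s N : Int) (h0 : 0 ≤ s) (hsN : s ≤ N) :
    (PySem.List.pyRange 0 N 1).filter (fun i => decide (¬ (0 ≤ i ∧ i < s)))
      = PySem.List.pyRange s N 1 := by
  rw [PySem.List.pyRange_one_append 0 s N h0 hsN, List.filter_append]
  have h1 : (PySem.List.pyRange 0 s 1).filter (fun i => decide (¬ (0 ≤ i ∧ i < s))) = [] := by
    rw [List.filter_eq_nil_iff]
    intro a ha
    have := (PySem.List.mem_pyRange_one).mp ha
    simp only [decide_eq_true_eq, not_not]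
    omega
  have h2 : (PySem.List.pyRange s N 1).filter (fun i => decide (¬ (0 ≤ i ∧ i < s)))
      = PySem.List.pyRange s N 1 := by
    rw [List.filter_eq_self]
    intro a ha
    have := (PySem.List.mem_pyRange_one).mp ha
    simp only [decide_eq_true_eq]
    omega
  rw [h1, h2, List.nil_append]

-- the complement scan over two ranges is the upper range
lemma diff_ranges (s N : Int) (h0 : 0 ≤ s) (hsN : s ≤ N) :
    Diff (PySem.List.pyRange 0 N 1) (PySem.List.pyRange 0 s 1) = PySem.List.pyRange s N 1 := by
  unfold Diff
  rw [List.filter_append]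
  have h2 : (PySem.List.pyRange 0 s 1).filter
      (fun i => !((PySem.List.pyRange 0 N 1).contains i) || !((PySem.List.pyRange 0 s 1).contains i)) = [] := by
    rw [List.filter_eq_nil_iff]
    intro a ha
    have has := (PySem.List.mem_pyRange_one).mp ha
    have h1 : a ∈ PySem.List.pyRange 0 N 1 := PySem.List.mem_pyRange_one.mpr ⟨has.1, by omega⟩
    simp [ha, h1]
  have h1 : (PySem.List.pyRange 0 N 1).filter
      (fun i => !((PySem.List.pyRange 0 N 1).contains i) || !((PySem.List.pyRange 0 s 1).contains i))
      = (PySem.List.pyRange 0 N 1).filter (fun i => decide (¬ (0 ≤ i ∧ i < s))) := by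
    apply List.filter_congr
    intro a ha
    simp [ha, PySem.List.mem_pyRange_one]
    by_cases hd : a < s
    · simp [hd]
    · simp [hd]; omega
  rw [h1, h2, List.append_nil, filter_ge s N h0 hsN]

-- flat_rows for an arbitrary Int row count (empty when negative)
lemma flat_rows_int (m l1 : Int) (h1 : 0 ≤ l1) :
    (((PySem.List.pyRange 0 m 1).map (fun i => i * l1)).map
      (fun init => (PySem.List.pyRange 0 l1 1).map (fun i => init + i))).flatten
      = PySem.List.pyRange 0 (m * l1) 1 := by
  by_cases hm : 0 ≤ m
  · obtain ⟨n, rfl⟩ := Int.eq_ofNat_of_zero_le hm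
    exact flat_rows n l1 h1
  · have hm' : m ≤ 0 := by omega
    rw [PySem.List.pyRange_one_eq_nil hm',
      PySem.List.pyRange_one_eq_nil (by nlinarith : m * l1 ≤ 0)]
    simp

lemma floordiv_two_nonneg (a : Int) (h : 0 ≤ a) :
    0 ≤ PySem.Int.floordiv a 2 ∧ PySem.Int.floordiv a 2 ≤ a := by
  rw [PySem.Int.floordiv_eq_ediv_of_pos (by norm_num)]
  omega

lemma floordiv_two_neg (a : Int) (h : a < 0) :
    PySem.Int.floordiv a 2 < 0 ∧ a ≤ PySem.Int.floordiv a 2 := by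
  rw [PySem.Int.floordiv_eq_ediv_of_pos (by norm_num)]
  omega

-- ===== VERDICT (by name: the statement is the Claim_ definition above) =====
theorem horizontal_bipartition_spec : Claim_equal_horizontal_bipartition := by
  intro L _ hPre
  obtain ⟨hlen, hsign⟩ := hPre
  match L, hlen with
  | l0 :: l1 :: rest, _ =>
    have hlen1 : (0:Int) ≤ (rest.length : Int) + 1 := by positivity
    have hg0 : PySem.List.pyGet? (l0 :: l1 :: rest) (0 : Int) = some l0 := by
      simp [PySem.List.pyGet?, PySem.List.pyIdx?, hlen1]
    have hg1 : PySem.List.pyGet? (l0 :: l1 :: rest) (1 : Int) = some l1 := by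
      simp [PySem.List.pyGet?, PySem.List.pyIdx?]
    simp only [List.getD, List.getElem?_cons_zero, List.getElem?_cons_succ,
      Option.getD_some] at hsign
    unfold Spec_horizontal_bipartition horizontal_bipartition horizontal_bipartition_alt
    rw [hg0, hg1]
    simp only [Option.bind_some, Option.map_some, Option.getD_some]
    set m := PySem.Int.floordiv l0 2 with hm
    by_cases h1 : 0 ≤ l1
    · -- columns nonnegative: A's rows flatten to range(m*l1); complement is the rest
      by_cases h0 : 0 ≤ l0
      · have hfd := floordiv_two_nonneg l0 h0
        refine Prod.ext ?_ ?_
        · simpa using flat_rows_int m l1 h1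
        · simp only []
          rw [flat_rows_int m l1 h1]
          exact diff_ranges (m * l1) (l0 * l1) (mul_nonneg hfd.1 h1)
            (by have : m ≤ l0 := hfd.2; nlinarith)
      · -- negative rows: everything is empty on both sides
        have h0' : l0 < 0 := by omega
        have hfd := floordiv_two_neg l0 h0'
        have hmnil : PySem.List.pyRange 0 m 1 = [] :=
          PySem.List.pyRange_one_eq_nil (by omega)
        have hN : l0 * l1 ≤ m * l1 := by nlinarith [hfd.2]
        have hs : m * l1 ≤ 0 := by nlinarith [hfd.1]
        refine Prod.ext ?_ ?_
        · simp [hmnil, PySem.List.pyRange_one_eq_nil hs]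
        · simp [hmnil, Diff, PySem.List.pyRange_one_eq_nil (by nlinarith : l0 * l1 ≤ 0),
            PySem.List.pyRange_one_eq_nil hN]
    · -- negative columns (rows nonnegative by Pre_): everything is empty on both sides
      have h1' : l1 < 0 := by omega
      have h0 : 0 ≤ l0 := by omega
      have hfd := floordiv_two_nonneg l0 h0
      have hcolnil : PySem.List.pyRange 0 l1 1 = [] :=
        PySem.List.pyRange_one_eq_nil (by omega)
      have hs : m * l1 ≤ 0 := by nlinarith [hfd.1]
      have hN : l0 * l1 ≤ m * l1 := by nlinarith [hfd.2]
      refine Prod.ext ?_ ?_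
      · simp [hcolnil, PySem.List.pyRange_one_eq_nil hs]
      · simp [hcolnil, Diff, PySem.List.pyRange_one_eq_nil (by nlinarith : l0 * l1 ≤ 0),
          PySem.List.pyRange_one_eq_nil hN]
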